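-- pv_equiv track=rewrite | github.com/VladislavChenakin/-2--12- | ChenakinLab5_2.py | algorithmic_method
-- ===== SOURCE A (Python) =====
-- restricted = {(1, 2), (3, 4), (7, 8)}  # Запрещенные соседние комбинации
--
-- def algorithmic_method(N, K):
--     result = []
--     for v1 in range(1, N+1): #каждый цикл отвечает за выбор вагона для одного конкретного человека
--         for v2 in range(1, N+1):
--             if v2 == v1 or (v1, v2) in restricted: # Вагоны не должны совпадать и не должны находится рядом
--                 continue
--             for v3 in range(1, N+1):
--                 if v3 in {v1, v2} or (v2, v3) in restricted:
--                     continue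
--                 for v4 in range(1, N+1):
--                     if v4 in {v1, v2, v3} or (v3, v4) in restricted:
--                         continue
--                     result.append((v1, v2, v3, v4))
--     return result
-- ===== SOURCE B (Python) =====
-- restricted = {(1, 2), (3, 4), (7, 8)}  # forbidden adjacent pairs
--
-- def algorithmic_method(N, K):
--     # generate all 4-permutations by element removal, then filter restricted adjacencies
--     def select(xs):
--         return [(xs[i], xs[:i] + xs[i+1:]) for i in range(len(xs))]
--     wagons = list(range(1, N + 1))
--     tuples = [(a, b, c, d)
--               for a, r1 in select(wagons)
--               for b, r2 in select(r1)
--               for c, r3 in select(r2)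
--               for d in r3]
--     return [t for t in tuples
--             if (t[0], t[1]) not in restricted
--             and (t[1], t[2]) not in restricted
--             and (t[2], t[3]) not in restricted]
-- ===== Notes on version B (the rewrite author's own statement) =====
-- stated objective: alternative
-- what changed: Replaces A's four nested range loops with in-loop pruning (continue on repeats and restricted pairs) by a generate-then-filter pass: 4-permutations are built by recursive element removal (a select helper guarantees distinctness), and restricted adjacencies are removed by one final filter.
import Mathlib
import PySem

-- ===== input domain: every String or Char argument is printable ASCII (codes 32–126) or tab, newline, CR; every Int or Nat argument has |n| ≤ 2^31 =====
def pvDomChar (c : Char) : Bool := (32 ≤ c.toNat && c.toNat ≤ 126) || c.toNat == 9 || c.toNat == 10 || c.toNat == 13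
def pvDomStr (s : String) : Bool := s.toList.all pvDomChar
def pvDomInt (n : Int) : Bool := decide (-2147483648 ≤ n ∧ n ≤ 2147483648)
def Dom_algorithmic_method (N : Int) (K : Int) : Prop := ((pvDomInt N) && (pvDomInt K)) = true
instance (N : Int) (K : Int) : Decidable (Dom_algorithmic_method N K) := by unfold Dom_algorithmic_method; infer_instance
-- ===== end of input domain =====

-- B replaces A's four nested pruned range loops by permutation generation via element removal
-- (a select helper) followed by one final filter of restricted adjacencies (alternative decomposition, same cost).

-- module-level constant: restricted = {(1, 2), (3, 4), (7, 8)}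
def restrictedSet : PySem.Set (Int × Int) := PySem.Set.ofList [(1,2),(3,4),(7,8)]

-- ===== PORT A =====
def algorithmic_method (N : Int) (K : Int) : List (Int × Int × Int × Int) :=
  (PySem.List.pyRange 1 (N+1) 1).foldl (fun result v1 =>
    (PySem.List.pyRange 1 (N+1) 1).foldl (fun result v2 =>
      if v2 == v1 || restrictedSet.contains (v1, v2) then result
      else (PySem.List.pyRange 1 (N+1) 1).foldl (fun result v3 =>
        if PySem.Set.contains (PySem.Set.ofList [v1, v2]) v3 || restrictedSet.contains (v2, v3) then result
        else (PySem.List.pyRange 1 (N+1) 1).foldl (fun result v4 =>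
          if PySem.Set.contains (PySem.Set.ofList [v1, v2, v3]) v4 || restrictedSet.contains (v3, v4) then result
          else result ++ [(v1, v2, v3, v4)]) result) result) result) []

-- ===== PORT B =====
-- select(xs) = [(xs[i], xs[:i] + xs[i+1:]) for i in range(len(xs))]
def pvSelect : List Int → List (Int × List Int)
  | [] => []
  | x :: xs => (x, xs) :: (pvSelect xs).map (fun p => (p.1, x :: p.2))

def pvPerms4 (xs : List Int) : List (Int × Int × Int × Int) :=
  (pvSelect xs).flatMap (fun p1 =>
    (pvSelect p1.2).flatMap (fun p2 =>
      (pvSelect p2.2).flatMap (fun p3 =>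
        p3.2.map (fun d => (p1.1, p2.1, p3.1, d)))))

def pvOk (t : Int × Int × Int × Int) : Bool :=
  !restrictedSet.contains (t.1, t.2.1) &&
  !restrictedSet.contains (t.2.1, t.2.2.1) &&
  !restrictedSet.contains (t.2.2.1, t.2.2.2)

def algorithmic_method_alt (N : Int) (K : Int) : List (Int × Int × Int × Int) :=
  (pvPerms4 (PySem.List.pyRange 1 (N+1) 1)).filter pvOk

-- ===== PRECONDITION & SPEC =====
def Spec_algorithmic_method (N : Int) (K : Int) (out : List (Int × Int × Int × Int)) : Prop := out = algorithmic_method_alt N K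
instance (N : Int) (K : Int) (out : List (Int × Int × Int × Int)) : Decidable (Spec_algorithmic_method N K out) := by unfold Spec_algorithmic_method; infer_instance

-- ===== CLAIM (what is proved, stated in full; the proofs are below) =====
def Claim_equal_algorithmic_method : Prop := ∀ (N : Int) (K : Int), Dom_algorithmic_method N K → Spec_algorithmic_method N K (algorithmic_method N K)

-- ===== LEMMAS AND PROOFS =====

-- the common canonical form both ports are reduced to
def pvCanon (L : List Int) : List (Int × Int × Int × Int) :=
  L.flatMap (fun a =>
    (L.filter (fun b => !(b == a || restrictedSet.contains (a, b)))).flatMap (fun b =>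
      (L.filter (fun c => !(PySem.Set.contains (PySem.Set.ofList [a, b]) c || restrictedSet.contains (b, c)))).flatMap (fun c =>
        (L.filter (fun d => !(PySem.Set.contains (PySem.Set.ofList [a, b, c]) d || restrictedSet.contains (c, d)))).map (fun d => (a, b, c, d)))))

theorem pv_foldl_guard_flatMap {α β : Type} (l : List α) (p : α → Bool) (g : α → List β) (acc : List β) :
    l.foldl (fun acc x => if p x then acc else acc ++ g x) acc = acc ++ (l.filter (fun x => !p x)).flatMap g := by
  have h : l.foldl (fun acc x => if p x then acc else acc ++ g x) acc
      = l.foldl (fun acc x => if !p x then acc ++ g x else acc) acc := by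
    apply PySem.List.foldl_congr_mem
    intro acc x _
    cases p x <;> simp
  rw [h, PySem.List.foldl_if_eq_foldl_filter, PySem.List.foldl_append_eq_flatMap]

theorem pv_A_canon (N K : Int) : algorithmic_method N K = pvCanon (PySem.List.pyRange 1 (N+1) 1) := by
  unfold algorithmic_method pvCanon
  generalize PySem.List.pyRange 1 (N+1) 1 = L
  have h4 : ∀ (v1 v2 v3 : Int) (r : List (Int × Int × Int × Int)),
      L.foldl (fun result v4 =>
          if PySem.Set.contains (PySem.Set.ofList [v1, v2, v3]) v4 || restrictedSet.contains (v3, v4) then result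
          else result ++ [(v1, v2, v3, v4)]) r
      = r ++ (L.filter (fun d => !(PySem.Set.contains (PySem.Set.ofList [v1, v2, v3]) d || restrictedSet.contains (v3, d)))).map (fun d => (v1, v2, v3, d)) := by
    intro v1 v2 v3 r
    rw [pv_foldl_guard_flatMap, ← List.map_eq_flatMap]
  have h3 : ∀ (v1 v2 : Int) (r : List (Int × Int × Int × Int)),
      L.foldl (fun result v3 =>
        if PySem.Set.contains (PySem.Set.ofList [v1, v2]) v3 || restrictedSet.contains (v2, v3) then result
        else L.foldl (fun result v4 =>
          if PySem.Set.contains (PySem.Set.ofList [v1, v2, v3]) v4 || restrictedSet.contains (v3, v4) then result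
          else result ++ [(v1, v2, v3, v4)]) result) r
      = r ++ (L.filter (fun c => !(PySem.Set.contains (PySem.Set.ofList [v1, v2]) c || restrictedSet.contains (v2, c)))).flatMap (fun c =>
          (L.filter (fun d => !(PySem.Set.contains (PySem.Set.ofList [v1, v2, c]) d || restrictedSet.contains (c, d)))).map (fun d => (v1, v2, c, d))) := by
    intro v1 v2 r
    have hc : L.foldl (fun result v3 =>
        if PySem.Set.contains (PySem.Set.ofList [v1, v2]) v3 || restrictedSet.contains (v2, v3) then result
        else L.foldl (fun result v4 =>
          if PySem.Set.contains (PySem.Set.ofList [v1, v2, v3]) v4 || restrictedSet.contains (v3, v4) then result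
          else result ++ [(v1, v2, v3, v4)]) result) r
        = L.foldl (fun result v3 =>
        if PySem.Set.contains (PySem.Set.ofList [v1, v2]) v3 || restrictedSet.contains (v2, v3) then result
        else result ++ (L.filter (fun d => !(PySem.Set.contains (PySem.Set.ofList [v1, v2, v3]) d || restrictedSet.contains (v3, d)))).map (fun d => (v1, v2, v3, d))) r := by
      apply PySem.List.foldl_congr_mem
      intro acc x _
      by_cases h : (PySem.Set.contains (PySem.Set.ofList [v1, v2]) x || restrictedSet.contains (v2, x)) = true
      · simp only [h, if_true]
      · simp only [h, if_false]
        rw [h4]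
    rw [hc, pv_foldl_guard_flatMap]
  have h2 : ∀ (v1 : Int) (r : List (Int × Int × Int × Int)),
      L.foldl (fun result v2 =>
        if v2 == v1 || restrictedSet.contains (v1, v2) then result
        else L.foldl (fun result v3 =>
          if PySem.Set.contains (PySem.Set.ofList [v1, v2]) v3 || restrictedSet.contains (v2, v3) then result
          else L.foldl (fun result v4 =>
            if PySem.Set.contains (PySem.Set.ofList [v1, v2, v3]) v4 || restrictedSet.contains (v3, v4) then result
            else result ++ [(v1, v2, v3, v4)]) result) result) r
      = r ++ (L.filter (fun b => !(b == v1 || restrictedSet.contains (v1, b)))).flatMap (fun b =>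
          (L.filter (fun c => !(PySem.Set.contains (PySem.Set.ofList [v1, b]) c || restrictedSet.contains (b, c)))).flatMap (fun c =>
            (L.filter (fun d => !(PySem.Set.contains (PySem.Set.ofList [v1, b, c]) d || restrictedSet.contains (c, d)))).map (fun d => (v1, b, c, d)))) := by
    intro v1 r
    have hc : L.foldl (fun result v2 =>
        if v2 == v1 || restrictedSet.contains (v1, v2) then result
        else L.foldl (fun result v3 =>
          if PySem.Set.contains (PySem.Set.ofList [v1, v2]) v3 || restrictedSet.contains (v2, v3) then result
          else L.foldl (fun result v4 =>
            if PySem.Set.contains (PySem.Set.ofList [v1, v2, v3]) v4 || restrictedSet.contains (v3, v4) then result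
            else result ++ [(v1, v2, v3, v4)]) result) result) r
        = L.foldl (fun result v2 =>
        if v2 == v1 || restrictedSet.contains (v1, v2) then result
        else result ++ (L.filter (fun c => !(PySem.Set.contains (PySem.Set.ofList [v1, v2]) c || restrictedSet.contains (v2, c)))).flatMap (fun c =>
            (L.filter (fun d => !(PySem.Set.contains (PySem.Set.ofList [v1, v2, c]) d || restrictedSet.contains (c, d)))).map (fun d => (v1, v2, c, d)))) r := by
      apply PySem.List.foldl_congr_mem
      intro acc x _
      by_cases h : (x == v1 || restrictedSet.contains (v1, x)) = true
      · simp only [h, if_true]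
      · simp only [h, if_false]
        rw [h3]
    rw [hc, pv_foldl_guard_flatMap]
  have hc : L.foldl (fun result v1 =>
      L.foldl (fun result v2 =>
        if v2 == v1 || restrictedSet.contains (v1, v2) then result
        else L.foldl (fun result v3 =>
          if PySem.Set.contains (PySem.Set.ofList [v1, v2]) v3 || restrictedSet.contains (v2, v3) then result
          else L.foldl (fun result v4 =>
            if PySem.Set.contains (PySem.Set.ofList [v1, v2, v3]) v4 || restrictedSet.contains (v3, v4) then result
            else result ++ [(v1, v2, v3, v4)]) result) result) result) []
      = L.foldl (fun result v1 =>
      result ++ (L.filter (fun b => !(b == v1 || restrictedSet.contains (v1, b)))).flatMap (fun b =>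
          (L.filter (fun c => !(PySem.Set.contains (PySem.Set.ofList [v1, b]) c || restrictedSet.contains (b, c)))).flatMap (fun c =>
            (L.filter (fun d => !(PySem.Set.contains (PySem.Set.ofList [v1, b, c]) d || restrictedSet.contains (c, d)))).map (fun d => (v1, b, c, d))))) [] := by
    apply PySem.List.foldl_congr_mem
    intro acc x _
    rw [h2]
  rw [hc, PySem.List.foldl_append_eq_flatMap, List.nil_append]

theorem pv_select_char (xs : List Int) (h : xs.Nodup) :
    pvSelect xs = xs.map (fun a => (a, xs.filter (fun y => y != a))) := by
  induction xs with
  | nil => simp [pvSelect]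
  | cons x xs ih =>
    rw [List.nodup_cons] at h
    rw [pvSelect, ih h.2]
    simp only [List.map_cons, List.map_map]
    rw [List.cons_eq_cons]
    constructor
    · have hf : List.filter (fun y => y != x) (x :: xs) = xs := by
        rw [List.filter_cons_of_neg (by simp)]
        exact List.filter_eq_self.mpr (fun y hy => by
          simp only [bne_iff_ne, ne_eq]
          intro hxy; exact h.1 (hxy ▸ hy))
      rw [hf]
    · apply List.map_congr_left
      intro a ha
      simp only [Function.comp]
      have hxa : (x != a) = true := by
        simp only [bne_iff_ne, ne_eq]; intro hxa; exact h.1 (hxa ▸ ha)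
      simp [List.filter_cons, hxa]

theorem pv_filter_flatMap {α β : Type} (l : List α) (f : α → List β) (p : β → Bool) :
    (l.flatMap f).filter p = l.flatMap (fun a => (f a).filter p) := by
  induction l with
  | nil => simp
  | cons x xs ih => simp [List.flatMap_cons, List.filter_append, ih]

theorem pv_flatMap_congr {α β : Type} (l : List α) (f g : α → List β) (h : ∀ x ∈ l, f x = g x) :
    l.flatMap f = l.flatMap g := by
  induction l with
  | nil => rfl
  | cons x xs ih =>
    simp only [List.flatMap_cons]
    rw [h x (List.mem_cons_self), ih (fun y hy => h y (List.mem_cons_of_mem _ hy))]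

theorem pv_flatMap_if_guard {α β : Type} (l : List α) (p : α → Bool) (g : α → List β) :
    l.flatMap (fun x => if p x then g x else []) = (l.filter p).flatMap g := by
  induction l with
  | nil => rfl
  | cons x xs ih =>
    by_cases h : p x = true <;>
      simp [List.flatMap_cons, List.filter_cons, h, ih]

theorem pv_contains2 (a b c : Int) :
    PySem.Set.contains (PySem.Set.ofList [a, b]) c = ((c == a) || (c == b)) := by
  simp [PySem.Set.contains, PySem.Set.mem_ofList, beq_eq_decide]

theorem pv_contains3 (a b c d : Int) :
    PySem.Set.contains (PySem.Set.ofList [a, b, c]) d = ((d == a) || (d == b) || (d == c)) := by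
  simp [PySem.Set.contains, PySem.Set.mem_ofList, beq_eq_decide, Bool.or_assoc]

theorem pv_B_canon (N K : Int) : algorithmic_method_alt N K = pvCanon (PySem.List.pyRange 1 (N+1) 1) := by
  unfold algorithmic_method_alt pvCanon pvPerms4
  have hN : (PySem.List.pyRange 1 (N+1) 1).Nodup := PySem.List.nodup_pyRange_one 1 (N+1)
  revert hN
  generalize PySem.List.pyRange 1 (N+1) 1 = L
  intro hN
  -- expand the three levels of pvSelect on nodup lists
  rw [pv_select_char L hN, List.flatMap_map]
  have step2 : ∀ a : Int,
      (pvSelect (L.filter (fun y => y != a))).flatMap (fun p2 =>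
        (pvSelect p2.2).flatMap (fun p3 => p3.2.map (fun d => (a, p2.1, p3.1, d))))
      = (L.filter (fun y => y != a)).flatMap (fun b =>
          ((L.filter (fun y => y != a)).filter (fun y => y != b)).flatMap (fun c =>
            (((L.filter (fun y => y != a)).filter (fun y => y != b)).filter (fun y => y != c)).map (fun d => (a, b, c, d)))) := by
    intro a
    rw [pv_select_char _ (hN.filter _), List.flatMap_map]
    apply pv_flatMap_congr
    intro b _
    rw [pv_select_char _ ((hN.filter _).filter _), List.flatMap_map]
  rw [pv_flatMap_congr _ _ _ (fun a _ => step2 a), pv_filter_flatMap]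
  apply pv_flatMap_congr
  intro a _
  rw [pv_filter_flatMap]
  have hb : ∀ b : Int,
      (((L.filter (fun y => y != a)).filter (fun y => y != b)).flatMap (fun c =>
        ((((L.filter (fun y => y != a)).filter (fun y => y != b)).filter (fun y => y != c)).map (fun d => (a, b, c, d))))).filter pvOk
      = if !restrictedSet.contains (a, b) then
          ((L.filter (fun y => y != a)).filter (fun y => y != b)).flatMap (fun c =>
            if !restrictedSet.contains (b, c) then
              ((((L.filter (fun y => y != a)).filter (fun y => y != b)).filter (fun y => y != c)).filter (fun d => !restrictedSet.contains (c, d))).map (fun d => (a, b, c, d))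
            else [])
        else [] := by
    intro b
    rw [pv_filter_flatMap]
    by_cases hab : (a, b) ∈ restrictedSet
    · rw [if_neg (by simp [PySem.Set.contains, hab])]
      simp [List.filter_map, pvOk, PySem.Set.contains, hab, Function.comp]
    · rw [if_pos (by simp [PySem.Set.contains, hab])]
      apply pv_flatMap_congr
      intro c _
      by_cases hbc : (b, c) ∈ restrictedSet
      · rw [if_neg (by simp [PySem.Set.contains, hbc])]
        simp [List.filter_map, pvOk, PySem.Set.contains, hab, hbc, Function.comp]
      · rw [if_pos (by simp [PySem.Set.contains, hbc]), List.filter_map]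
        have hpt : ∀ d ∈ ((L.filter (fun y => y != a)).filter (fun y => y != b)).filter (fun y => y != c),
            (pvOk ∘ (fun d => (a, b, c, d))) d = !restrictedSet.contains (c, d) := by
          intro d _
          simp [pvOk, PySem.Set.contains, hab, hbc]
        rw [List.filter_congr hpt]
  rw [pv_flatMap_congr _ _ _ (fun b _ => hb b), pv_flatMap_if_guard]
  have hbase1 : (L.filter (fun y => y != a)).filter (fun b => !restrictedSet.contains (a, b))
      = L.filter (fun b => !(b == a || restrictedSet.contains (a, b))) := by
    rw [List.filter_filter]
    exact List.filter_congr (fun b _ => by simp [bne, Bool.not_or, Bool.and_comm])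
  rw [hbase1]
  apply pv_flatMap_congr
  intro b _
  rw [pv_flatMap_if_guard]
  have hbase2 : ((L.filter (fun y => y != a)).filter (fun y => y != b)).filter (fun c => !restrictedSet.contains (b, c))
      = L.filter (fun c => !(PySem.Set.contains (PySem.Set.ofList [a, b]) c || restrictedSet.contains (b, c))) := by
    rw [List.filter_filter, List.filter_filter]
    exact List.filter_congr (fun c _ => by
      simp [pv_contains2, bne, Bool.not_or, Bool.and_comm, Bool.and_left_comm, Bool.and_assoc, beq_eq_decide])
  rw [hbase2]
  apply pv_flatMap_congr
  intro c _
  have hbase3 : (((L.filter (fun y => y != a)).filter (fun y => y != b)).filter (fun y => y != c)).filter (fun d => !restrictedSet.contains (c, d))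
      = L.filter (fun d => !(PySem.Set.contains (PySem.Set.ofList [a, b, c]) d || restrictedSet.contains (c, d))) := by
    rw [List.filter_filter, List.filter_filter, List.filter_filter]
    exact List.filter_congr (fun d _ => by
      simp [pv_contains3, bne, Bool.not_or, Bool.and_comm, Bool.and_left_comm, Bool.and_assoc, beq_eq_decide])
  rw [hbase3]

-- ===== VERDICT (by name: the statement is the Claim_ definition above) =====
theorem algorithmic_method_spec : Claim_equal_algorithmic_method := by
  intro N K _
  unfold Spec_algorithmic_method
  rw [pv_A_canon N K, pv_B_canon N K]
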